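-- pv_equiv track=rewrite | github.com/bf6/bioinformatics | course1/week1/custom.py | get_kmers_and_indices
-- ===== SOURCE A (Python) =====
-- from collections import defaultdict
--
-- def get_kmers_and_indices(genome: str, k: int):
--     """
--     Find words of length `k` along with their occurence, first and
--     last appearance in `genome`
--     """
--     kmers = defaultdict(lambda: {
--         'occurrences': 0, 'first_position': None, 'last_position': None})
--     for x in range(0, len(genome) - k + 1):
--         kmer = genome[x:x+k]
--         kmers[kmer]['occurrences'] += 1
--         if kmers[kmer]['first_position'] is None:
--             kmers[kmer]['first_position'] = x
--         kmers[kmer]['last_position'] = x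
--     return kmers
-- ===== SOURCE B (Python) =====
-- from collections import defaultdict
--
-- def get_kmers_and_indices(genome: str, k: int):
--     """
--     Find words of length `k` along with their occurence, first and
--     last appearance in `genome`
--     """
--     index = defaultdict(list)
--     for x in range(0, len(genome) - k + 1):
--         index[genome[x:x+k]].append(x)
--     kmers = defaultdict(lambda: {
--         'occurrences': 0, 'first_position': None, 'last_position': None})
--     for kmer, positions in index.items():
--         kmers[kmer] = {'occurrences': len(positions),
--                        'first_position': positions[0],
--                        'last_position': positions[-1]}
--     return kmers
-- ===== Notes on version B (the rewrite author's own statement) =====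
-- stated objective: alternative
-- what changed: B first builds a position index (kmer -> list of positions) in one pass and then derives each summary record from that list (len, first, last) in a second pass, instead of A's per-step mutation of a three-field record; same defaultdict factory and insertion order.
import Mathlib
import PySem

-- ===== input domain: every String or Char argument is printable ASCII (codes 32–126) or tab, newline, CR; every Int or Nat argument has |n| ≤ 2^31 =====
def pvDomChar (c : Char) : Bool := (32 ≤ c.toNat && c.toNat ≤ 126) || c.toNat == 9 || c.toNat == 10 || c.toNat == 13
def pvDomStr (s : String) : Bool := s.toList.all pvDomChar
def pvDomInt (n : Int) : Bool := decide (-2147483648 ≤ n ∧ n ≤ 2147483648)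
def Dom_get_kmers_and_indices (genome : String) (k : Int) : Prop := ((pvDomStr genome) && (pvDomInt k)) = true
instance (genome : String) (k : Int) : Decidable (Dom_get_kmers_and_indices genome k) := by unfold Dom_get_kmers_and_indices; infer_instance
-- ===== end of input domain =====

-- B replaces A's per-step mutation of a three-field record by a position index built first
-- (kmer -> list of positions), from which each record is derived (length, first, last); same
-- insertion order; objective: alternative decomposition.

-- ===== PORT A =====
-- the defaultdict factory's value
def pvEntry0 : PySem.Dict String (Option Int) :=
  PySem.Dict.ofList [("occurrences", some 0), ("first_position", none), ("last_position", none)]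

-- one iteration of A's loop body (the 'occurrences' value is always `some`; Option.map (·+1)
-- is Python's `+= 1` on every reachable entry)
def pvStepA (genome : String) (k : Int)
    (kmers : PySem.Dict String (PySem.Dict String (Option Int))) (x : Int) :
    PySem.Dict String (PySem.Dict String (Option Int)) :=
  let kmer := PySem.Str.slice genome (some x) (some (x + k))
  let e0 := kmers.getD kmer pvEntry0
  let e1 := e0.insert "occurrences" ((e0.getD "occurrences" none).map (· + 1))
  let e2 := if e1.getD "first_position" none = none then e1.insert "first_position" (some x) else e1
  let e3 := e2.insert "last_position" (some x)
  kmers.insert kmer e3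

def get_kmers_and_indices (genome : String) (k : Int) : List (String × List (String × Option Int)) :=
  let kmers := (PySem.List.pyRange 0 (PySem.Str.len genome - k + 1) 1).foldl
    (pvStepA genome k) PySem.Dict.empty
  kmers.items.map (fun p => (p.1, p.2.items))

-- ===== PORT B =====
-- the summary record derived from a kmer's position list (positions[0] / positions[-1] as pyGet?;
-- the list is never empty when this is applied)
def pvEntryB (ps : List Int) : List (String × Option Int) :=
  [("occurrences", some (PySem.List.len ps)),
   ("first_position", PySem.List.pyGet? ps 0),
   ("last_position", PySem.List.pyGet? ps (-1))]

def get_kmers_and_indices_alt (genome : String) (k : Int) : List (String × List (String × Option Int)) :=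
  let idx := (PySem.List.pyRange 0 (PySem.Str.len genome - k + 1) 1).foldl
    (fun d x => d.modify (PySem.Str.slice genome (some x) (some (x + k))) [] (· ++ [x]))
    PySem.Dict.empty
  let kmers := idx.items.foldl
    (fun (r : PySem.Dict String (List (String × Option Int))) p => r.insert p.1 (pvEntryB p.2))
    PySem.Dict.empty
  kmers.items

-- ===== PRECONDITION & SPEC =====
def Spec_get_kmers_and_indices (genome : String) (k : Int) (out : List (String × List (String × Option Int))) : Prop := out = get_kmers_and_indices_alt genome k
instance (genome : String) (k : Int) (out : List (String × List (String × Option Int))) : Decidable (Spec_get_kmers_and_indices genome k out) := by unfold Spec_get_kmers_and_indices; infer_instance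

-- ===== CLAIM (what is proved, stated in full; the proofs are below) =====
def Claim_equal_get_kmers_and_indices : Prop := ∀ (genome : String) (k : Int), Dom_get_kmers_and_indices genome k → Spec_get_kmers_and_indices genome k (get_kmers_and_indices genome k)

-- ===== LEMMAS AND PROOFS =====

def pvEntryA (ps : List Int) : PySem.Dict String (Option Int) := PySem.Dict.mk (pvEntryB ps)
def pvInner (e0 : PySem.Dict String (Option Int)) (x : Int) : PySem.Dict String (Option Int) :=
  let e1 := e0.insert "occurrences" ((e0.getD "occurrences" none).map (· + 1))
  let e2 := if e1.getD "first_position" none = none then e1.insert "first_position" (some x) else e1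
  e2.insert "last_position" (some x)
lemma pvInner_entry0 (x : Int) : pvInner pvEntry0 x = pvEntryA [x] := by rfl
lemma pvInner_entryA (p : Int) (ps : List Int) (x : Int) :
    pvInner (pvEntryA (p :: ps)) x = pvEntryA ((p :: ps) ++ [x]) := by
  simp [pvInner, pvEntryA, pvEntryB, PySem.Dict.insert, PySem.Dict.getD, PySem.Dict.get?,
        PySem.Dict.contains, PySem.List.len_eq, PySem.List.pyGet?_zero_cons]
  exact (PySem.List.pyGet?_neg_one_append_singleton (p :: ps) x).symm
lemma pv_get?_map (l : List (String × List Int)) (km : String) :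
    (PySem.Dict.mk (l.map (fun p => (p.1, pvEntryA p.2)))).get? km
      = ((PySem.Dict.mk l).get? km).map pvEntryA := by
  induction l with
  | nil => rfl
  | cons h t ih =>
      obtain ⟨k0, v0⟩ := h
      simp only [List.map_cons, PySem.Dict.get?_mk_cons, ih]
      split <;> rfl

lemma pvStep_rel (genome : String) (k : Int) (x : Int) (dB : PySem.Dict String (List Int))
    (hne : ∀ p ∈ dB.items, p.2 ≠ []) :
    pvStepA genome k (PySem.Dict.mk (dB.items.map (fun p => (p.1, pvEntryA p.2)))) x
      = PySem.Dict.mk ((dB.modify (PySem.Str.slice genome (some x) (some (x + k))) [] (· ++ [x])).items.map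
          (fun p => (p.1, pvEntryA p.2))) := by
  set km := PySem.Str.slice genome (some x) (some (x + k)) with hkm
  set dA := PySem.Dict.mk (dB.items.map (fun p => (p.1, pvEntryA p.2))) with hdA
  have hstep : pvStepA genome k dA x = dA.insert km (pvInner (dA.getD km pvEntry0) x) := rfl
  rw [hstep, PySem.Dict.modify]
  have hgA : dA.get? km = (dB.get? km).map pvEntryA := by rw [hdA, pv_get?_map]
  cases hc : dB.get? km with
  | none =>
    have hcB : dB.contains km = false := by rw [PySem.Dict.contains_eq_isSome_get?, hc]; rfl
    have hcA : dA.contains km = false := by rw [PySem.Dict.contains_eq_isSome_get?, hgA, hc]; rfl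
    have he0 : dA.getD km pvEntry0 = pvEntry0 := by
      rw [PySem.Dict.getD_eq_get?_getD, hgA, hc]; rfl
    have hgD : dB.getD km [] = [] := PySem.Dict.getD_of_get?_eq_none _ _ hc
    apply PySem.Dict.ext
    rw [he0, pvInner_entry0, PySem.Dict.items_insert_of_not_contains _ _ hcA,
        PySem.Dict.items_insert_of_not_contains _ _ hcB, hgD]
    simp [hdA, pvEntryA]
  | some ps =>
    have hps : ps ≠ [] := hne (km, ps) (PySem.Dict.mem_items_of_get?_eq_some _ hc)
    obtain ⟨p, ps', rfl⟩ : ∃ p ps', ps = p :: ps' := by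
      cases ps with | nil => exact absurd rfl hps | cons a b => exact ⟨a, b, rfl⟩
    have hcB : dB.contains km = true := by rw [PySem.Dict.contains_eq_isSome_get?, hc]; rfl
    have hcA : dA.contains km = true := by rw [PySem.Dict.contains_eq_isSome_get?, hgA, hc]; rfl
    have he0 : dA.getD km pvEntry0 = pvEntryA (p :: ps') := by
      rw [PySem.Dict.getD_eq_get?_getD, hgA, hc]; rfl
    have hgD : dB.getD km [] = p :: ps' := PySem.Dict.getD_of_get?_eq_some _ _ hc
    apply PySem.Dict.ext
    rw [he0, pvInner_entryA, PySem.Dict.items_insert_of_contains _ _ hcA,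
        PySem.Dict.items_insert_of_contains _ _ hcB, hgD]
    rw [hdA]
    simp only [List.map_map]
    apply List.map_congr_left
    intro q _
    by_cases hq : q.1 == km
    · simp [hq, Function.comp]
    · simp [Function.comp, hq]

lemma pvFold_rel (genome : String) (k : Int) (L : List Int) (dB : PySem.Dict String (List Int))
    (hne : ∀ p ∈ dB.items, p.2 ≠ []) :
    L.foldl (pvStepA genome k) (PySem.Dict.mk (dB.items.map (fun p => (p.1, pvEntryA p.2))))
      = PySem.Dict.mk ((L.foldl
          (fun d x => d.modify (PySem.Str.slice genome (some x) (some (x + k))) [] (· ++ [x])) dB).items.map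
          (fun p => (p.1, pvEntryA p.2))) := by
  induction L generalizing dB with
  | nil => rfl
  | cons x L' ih =>
      simp only [List.foldl_cons]
      rw [pvStep_rel genome k x dB hne]
      apply ih
      intro p hp
      rw [PySem.Dict.modify] at hp
      rcases (PySem.Dict.mem_items_insert _ _ _ _).mp hp with h | h
      · subst h; simp
      · exact hne p h.1

theorem pvMain (genome : String) (k : Int) :
    (((PySem.List.pyRange 0 (PySem.Str.len genome - k + 1) 1).foldl
        (pvStepA genome k) PySem.Dict.empty).items.map (fun p => (p.1, p.2.items)))
    = (((PySem.List.pyRange 0 (PySem.Str.len genome - k + 1) 1).foldl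
        (fun d x => d.modify (PySem.Str.slice genome (some x) (some (x + k))) [] (· ++ [x]))
        (PySem.Dict.empty : PySem.Dict String (List Int))).items.foldl
        (fun (r : PySem.Dict String (List (String × Option Int))) p => r.insert p.1 (pvEntryB p.2))
        PySem.Dict.empty).items := by
  set L := PySem.List.pyRange 0 (PySem.Str.len genome - k + 1) 1
  set idx := L.foldl (fun d x => d.modify (PySem.Str.slice genome (some x) (some (x + k))) [] (· ++ [x]))
      (PySem.Dict.empty : PySem.Dict String (List Int)) with hidx
  have h1 : L.foldl (pvStepA genome k) PySem.Dict.empty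
      = PySem.Dict.mk (idx.items.map (fun p => (p.1, pvEntryA p.2))) :=
    pvFold_rel genome k L PySem.Dict.empty (by intro p hp; cases hp)
  have hnd : idx.keys.Nodup := by
    rw [hidx]
    exact PySem.Dict.nodup_keys_foldl_modify_key L
      (fun x => PySem.Str.slice genome (some x) (some (x + k))) [] (fun d x v => v ++ [x])
      PySem.Dict.empty (by simp [PySem.Dict.keys_empty])
  have h2 := PySem.Dict.items_foldl_insert_fresh idx.items (fun p => p.1) (fun p => pvEntryB p.2)
      PySem.Dict.empty (by intro a _; exact PySem.Dict.contains_empty _) hnd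
  rw [h2, h1]
  simp [List.map_map, Function.comp_def, pvEntryA, PySem.Dict.empty]

-- ===== VERDICT (by name: the statement is the Claim_ definition above) =====
theorem get_kmers_and_indices_spec : Claim_equal_get_kmers_and_indices := by
  intro genome k _
  exact pvMain genome k
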